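-- pv_equiv track=rewrite | github.com/judepererajp-design/bot | TitanBot/src/position_optimizer.py | _get_asset_sector
-- ===== SOURCE A (Python) =====
-- def _get_asset_sector(symbol: str) -> str:
--     """
--     Simple sector detection for correlation awareness.
--     """
--     symbol_lower = symbol.lower()
--
--     if 'btc' in symbol_lower:
--         return 'bitcoin'
--     elif 'eth' in symbol_lower:
--         return 'ethereum'
--     elif any(x in symbol_lower for x in ['sol', 'ada', 'dot', 'avax']):
--         return 'layer1'
--     elif any(x in symbol_lower for x in ['link', 'uni', 'aave', 'comp']):
--         return 'defi'
--     elif any(x in symbol_lower for x in ['matic', 'arb', 'op']):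
--         return 'layer2'
--     else:
--         return 'altcoin'
-- ===== SOURCE B (Python) =====
-- # Different algorithm: a single left-to-right scan of the lowered symbol.
-- # At every position we try each keyword as a prefix of the remaining suffix,
-- # keeping the minimum sector rank seen anywhere; the rank indexes the sector name.
-- _KEYWORDS = [
--     ('btc', 0), ('eth', 1),
--     ('sol', 2), ('ada', 2), ('dot', 2), ('avax', 2),
--     ('link', 3), ('uni', 3), ('aave', 3), ('comp', 3),
--     ('matic', 4), ('arb', 4), ('op', 4),
-- ]
-- _SECTORS = ['bitcoin', 'ethereum', 'layer1', 'defi', 'layer2', 'altcoin']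
--
-- def _get_asset_sector(symbol: str) -> str:
--     s = symbol.lower()
--     best = 5
--     for i in range(len(s)):
--         for kw, rank in _KEYWORDS:
--             if rank < best and s.startswith(kw, i):
--                 best = rank
--     return _SECTORS[best]
-- ===== Notes on version B (the rewrite author's own statement) =====
-- stated objective: alternative
-- what changed: Replaces the chain of per-keyword substring membership tests with a single positional scan of the lowered symbol that prefix-matches all 13 keywords at each index while folding a minimum sector-rank accumulator, then indexes a sector-name table with the final rank.
import Mathlib
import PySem

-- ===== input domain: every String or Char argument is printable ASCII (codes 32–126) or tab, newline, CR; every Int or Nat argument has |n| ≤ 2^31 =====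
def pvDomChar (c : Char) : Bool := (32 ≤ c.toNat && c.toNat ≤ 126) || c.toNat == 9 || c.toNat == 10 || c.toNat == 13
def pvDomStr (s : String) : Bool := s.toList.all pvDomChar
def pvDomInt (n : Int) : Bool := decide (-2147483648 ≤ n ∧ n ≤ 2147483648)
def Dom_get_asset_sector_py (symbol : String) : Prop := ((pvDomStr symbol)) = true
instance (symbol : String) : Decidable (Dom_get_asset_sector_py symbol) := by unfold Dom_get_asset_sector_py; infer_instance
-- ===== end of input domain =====

-- B replaces A's chain of substring tests by a single positional scan that prefix-matches all keywords
-- at each index of the lowered symbol, folding a minimum sector-rank accumulator (objective: alternative).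


-- ===== PORT A =====
-- Port of A: literal if/elif chain on substring tests of the lowered symbol.
def get_asset_sector_py (symbol : String) : String :=
  let sl := PySem.Str.lower symbol
  if PySem.Str.isIn "btc" sl then "bitcoin"
  else if PySem.Str.isIn "eth" sl then "ethereum"
  else if ["sol", "ada", "dot", "avax"].any (fun x => PySem.Str.isIn x sl) then "layer1"
  else if ["link", "uni", "aave", "comp"].any (fun x => PySem.Str.isIn x sl) then "defi"
  else if ["matic", "arb", "op"].any (fun x => PySem.Str.isIn x sl) then "layer2"
  else "altcoin"

-- ===== PORT B =====
-- Port of B: scan every position of the lowered symbol, prefix-matching each (keyword, rank) pair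
-- against the suffix starting there, keeping the minimum rank; index the sector table with it.
def pvKW : List (List Char × Nat) :=
  [(['b','t','c'], 0), (['e','t','h'], 1),
   (['s','o','l'], 2), (['a','d','a'], 2), (['d','o','t'], 2), (['a','v','a','x'], 2),
   (['l','i','n','k'], 3), (['u','n','i'], 3), (['a','a','v','e'], 3), (['c','o','m','p'], 3),
   (['m','a','t','i','c'], 4), (['a','r','b'], 4), (['o','p'], 4)]

def pvSectors : List String := ["bitcoin", "ethereum", "layer1", "defi", "layer2", "altcoin"]

-- inner loop of Source B: fold over the keyword table at one position (suffix `suf`)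
def pvInner (suf : List Char) (b : Nat) : Nat :=
  pvKW.foldl (fun acc kr => if kr.2 < acc ∧ kr.1.isPrefixOf suf then kr.2 else acc) b

-- outer loop of Source B: positions i = 0 .. len-1, i.e. the nonempty suffixes in order
def pvScan : List Char → Nat → Nat
  | [], b => b
  | c :: rest, b => pvScan rest (pvInner (c :: rest) b)

-- _SECTORS[best]: best is always 0..5, in range, so getD is exact Python indexing here
def get_asset_sector_py_alt (symbol : String) : String :=
  pvSectors.getD (pvScan (PySem.Str.lower symbol).toList 5) "altcoin"

-- ===== PRECONDITION & SPEC =====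
def Spec_get_asset_sector_py (symbol : String) (out : String) : Prop := out = get_asset_sector_py_alt symbol
instance (symbol : String) (out : String) : Decidable (Spec_get_asset_sector_py symbol out) := by unfold Spec_get_asset_sector_py; infer_instance

-- ===== CLAIM (what is proved, stated in full; the proofs are below) =====
def Claim_equal_get_asset_sector_py : Prop := ∀ (symbol : String), Dom_get_asset_sector_py symbol → Spec_get_asset_sector_py symbol (get_asset_sector_py symbol)

-- ===== LEMMAS AND PROOFS =====

-- the inner fold computes the minimum of the accumulator and the ranks of keywords matching at this position
theorem pvInner_le_iff (kws : List (List Char × Nat)) (suf : List Char) (b x : Nat) :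
    kws.foldl (fun acc kr => if kr.2 < acc ∧ kr.1.isPrefixOf suf then kr.2 else acc) b ≤ x ↔
      b ≤ x ∨ ∃ kr ∈ kws, kr.2 ≤ x ∧ kr.1.isPrefixOf suf = true := by
  induction kws generalizing b with
  | nil => simp
  | cons kr rest ih =>
    simp only [List.foldl_cons, ih, List.mem_cons]
    split_ifs with h
    · constructor
      · rintro (h1 | ⟨kr', hm, hx, hp⟩)
        · exact Or.inr ⟨kr, Or.inl rfl, h1, h.2⟩
        · exact Or.inr ⟨kr', Or.inr hm, hx, hp⟩
      · rintro (h1 | ⟨kr', hm | hm, hx, hp⟩)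
        · omega
        · subst hm; exact Or.inl hx
        · exact Or.inr ⟨kr', hm, hx, hp⟩
    · constructor
      · rintro (h1 | ⟨kr', hm, hx, hp⟩)
        · exact Or.inl h1
        · exact Or.inr ⟨kr', Or.inr hm, hx, hp⟩
      · rintro (h1 | ⟨kr', hm | hm, hx, hp⟩)
        · exact Or.inl h1
        · subst hm
          rcases Decidable.not_and_iff_or_not.mp h with h' | h'
          · exact Or.inl (by omega)
          · exact absurd hp h'
        · exact Or.inr ⟨kr', hm, hx, hp⟩

-- the whole scan computes the minimum of 5 and the ranks of keywords occurring anywhere in s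
theorem pvScan_le_iff (s : List Char) (b x : Nat) :
    pvScan s b ≤ x ↔ b ≤ x ∨ ∃ kr ∈ pvKW, kr.2 ≤ x ∧ PySem.Chars.isIn kr.1 s = true := by
  induction s generalizing b with
  | nil =>
    simp only [pvScan]
    constructor
    · exact Or.inl
    · rintro (h1 | ⟨kr, hm, hx, hin⟩)
      · exact h1
      · have : kr.1 <:+: ([] : List Char) := (PySem.Chars.isIn_iff_infix kr.1 []).mp hin
        have hnil : kr.1 = [] := List.eq_nil_of_infix_nil this
        simp only [pvKW, List.mem_cons, List.not_mem_nil, or_false] at hm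
        rcases hm with rfl|rfl|rfl|rfl|rfl|rfl|rfl|rfl|rfl|rfl|rfl|rfl|rfl <;> simp at hnil
  | cons c rest ih =>
    simp only [pvScan, ih, pvInner, pvInner_le_iff]
    constructor
    · rintro ((h1 | ⟨kr, hm, hx, hp⟩) | ⟨kr, hm, hx, hin⟩)
      · exact Or.inl h1
      · refine Or.inr ⟨kr, hm, hx, (PySem.Chars.isIn_iff_infix _ _).mpr ?_⟩
        exact List.infix_cons_iff.mpr (Or.inl (List.isPrefixOf_iff_prefix.mp hp))
      · refine Or.inr ⟨kr, hm, hx, (PySem.Chars.isIn_iff_infix _ _).mpr ?_⟩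
        exact List.infix_cons_iff.mpr (Or.inr ((PySem.Chars.isIn_iff_infix _ _).mp hin))
    · rintro (h1 | ⟨kr, hm, hx, hin⟩)
      · exact Or.inl (Or.inl h1)
      · rcases List.infix_cons_iff.mp ((PySem.Chars.isIn_iff_infix _ _).mp hin) with hp | hinf
        · exact Or.inl (Or.inr ⟨kr, hm, hx, List.isPrefixOf_iff_prefix.mpr hp⟩)
        · exact Or.inr ⟨kr, hm, hx, (PySem.Chars.isIn_iff_infix _ _).mpr hinf⟩

-- ===== VERDICT (by name: the statement is the Claim_ definition above) =====
theorem get_asset_sector_py_spec : Claim_equal_get_asset_sector_py := by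
  intro symbol _
  unfold Spec_get_asset_sector_py get_asset_sector_py get_asset_sector_py_alt
  set L := (PySem.Str.lower symbol).toList with hL
  have hbr : ∀ sub : String, PySem.Str.isIn sub (PySem.Str.lower symbol) =
      PySem.Chars.isIn sub.toList L := by intro sub; simp [hL]
  simp only [List.any_cons, List.any_nil, Bool.or_false, Bool.or_eq_true, hbr]
  have le5 : pvScan L 5 ≤ 5 := (pvScan_le_iff L 5 5).mpr (Or.inl le_rfl)
  have wit : ∀ (k : List Char) (r : Nat), (k, r) ∈ pvKW →
      PySem.Chars.isIn k L = true → pvScan L 5 ≤ r := by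
    intro k r hm hin
    exact (pvScan_le_iff L 5 r).mpr (Or.inr ⟨(k, r), hm, le_rfl, hin⟩)
  have lower : ∀ x : Nat, (∀ kr ∈ pvKW, kr.2 ≤ x → PySem.Chars.isIn kr.1 L = false) →
      x < 5 → ¬ pvScan L 5 ≤ x := by
    intro x hno hx h
    rcases (pvScan_le_iff L 5 x).mp h with h5 | ⟨kr, hm, hr, hin⟩
    · omega
    · rw [hno kr hm hr] at hin; exact Bool.false_ne_true hin
  by_cases h0 : PySem.Chars.isIn ['b','t','c'] L = true
  · have hv : pvScan L 5 = 0 := Nat.le_zero.mp (wit ['b','t','c'] 0 (by decide) h0)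
    simp [h0, hv, pvSectors]
  by_cases h1 : PySem.Chars.isIn ['e','t','h'] L = true
  · have hle : pvScan L 5 ≤ 1 := wit ['e','t','h'] 1 (by decide) h1
    have hge : ¬ pvScan L 5 ≤ 0 := by
      refine lower 0 ?_ (by omega)
      intro kr hm hr
      simp only [pvKW, List.mem_cons, List.not_mem_nil, or_false] at hm
      rcases hm with rfl|rfl|rfl|rfl|rfl|rfl|rfl|rfl|rfl|rfl|rfl|rfl|rfl
      exacts [Bool.of_not_eq_true h0,
              absurd hr (by decide),
              absurd hr (by decide),
              absurd hr (by decide),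
              absurd hr (by decide),
              absurd hr (by decide),
              absurd hr (by decide),
              absurd hr (by decide),
              absurd hr (by decide),
              absurd hr (by decide),
              absurd hr (by decide),
              absurd hr (by decide),
              absurd hr (by decide)]
    have hv : pvScan L 5 = 1 := by omega
    simp [h0, h1, hv, pvSectors]
  by_cases h2 : PySem.Chars.isIn ['s','o','l'] L = true ∨ PySem.Chars.isIn ['a','d','a'] L = true ∨
      PySem.Chars.isIn ['d','o','t'] L = true ∨ PySem.Chars.isIn ['a','v','a','x'] L = true
  · have hle : pvScan L 5 ≤ 2 := by
      rcases h2 with h | h | h | h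
      exacts [wit ['s','o','l'] 2 (by decide) h, wit ['a','d','a'] 2 (by decide) h,
              wit ['d','o','t'] 2 (by decide) h, wit ['a','v','a','x'] 2 (by decide) h]
    have hge : ¬ pvScan L 5 ≤ 1 := by
      refine lower 1 ?_ (by omega)
      intro kr hm hr
      simp only [pvKW, List.mem_cons, List.not_mem_nil, or_false] at hm
      rcases hm with rfl|rfl|rfl|rfl|rfl|rfl|rfl|rfl|rfl|rfl|rfl|rfl|rfl
      exacts [Bool.of_not_eq_true h0,
              Bool.of_not_eq_true h1,
              absurd hr (by decide),
              absurd hr (by decide),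
              absurd hr (by decide),
              absurd hr (by decide),
              absurd hr (by decide),
              absurd hr (by decide),
              absurd hr (by decide),
              absurd hr (by decide),
              absurd hr (by decide),
              absurd hr (by decide),
              absurd hr (by decide)]
    have hv : pvScan L 5 = 2 := by omega
    rcases h2 with h | h | h | h <;> simp [h0, h1, h, hv, pvSectors]
  obtain ⟨hsol, hada, hdot, havax⟩ :
      ¬ PySem.Chars.isIn ['s','o','l'] L = true ∧ ¬ PySem.Chars.isIn ['a','d','a'] L = true ∧
      ¬ PySem.Chars.isIn ['d','o','t'] L = true ∧ ¬ PySem.Chars.isIn ['a','v','a','x'] L = true := by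
    simp only [not_or] at h2; exact h2
  by_cases h3 : PySem.Chars.isIn ['l','i','n','k'] L = true ∨ PySem.Chars.isIn ['u','n','i'] L = true ∨
      PySem.Chars.isIn ['a','a','v','e'] L = true ∨ PySem.Chars.isIn ['c','o','m','p'] L = true
  · have hle : pvScan L 5 ≤ 3 := by
      rcases h3 with h | h | h | h
      exacts [wit ['l','i','n','k'] 3 (by decide) h, wit ['u','n','i'] 3 (by decide) h,
              wit ['a','a','v','e'] 3 (by decide) h, wit ['c','o','m','p'] 3 (by decide) h]
    have hge : ¬ pvScan L 5 ≤ 2 := by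
      refine lower 2 ?_ (by omega)
      intro kr hm hr
      simp only [pvKW, List.mem_cons, List.not_mem_nil, or_false] at hm
      rcases hm with rfl|rfl|rfl|rfl|rfl|rfl|rfl|rfl|rfl|rfl|rfl|rfl|rfl
      exacts [Bool.of_not_eq_true h0,
              Bool.of_not_eq_true h1,
              Bool.of_not_eq_true hsol,
              Bool.of_not_eq_true hada,
              Bool.of_not_eq_true hdot,
              Bool.of_not_eq_true havax,
              absurd hr (by decide),
              absurd hr (by decide),
              absurd hr (by decide),
              absurd hr (by decide),
              absurd hr (by decide),
              absurd hr (by decide),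
              absurd hr (by decide)]
    have hv : pvScan L 5 = 3 := by omega
    rcases h3 with h | h | h | h <;>
      simp [h0, h1, hsol, hada, hdot, havax, h, hv, pvSectors]
  obtain ⟨hlink, huni, haave, hcomp⟩ :
      ¬ PySem.Chars.isIn ['l','i','n','k'] L = true ∧ ¬ PySem.Chars.isIn ['u','n','i'] L = true ∧
      ¬ PySem.Chars.isIn ['a','a','v','e'] L = true ∧ ¬ PySem.Chars.isIn ['c','o','m','p'] L = true := by
    simp only [not_or] at h3; exact h3
  by_cases h4 : PySem.Chars.isIn ['m','a','t','i','c'] L = true ∨ PySem.Chars.isIn ['a','r','b'] L = true ∨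
      PySem.Chars.isIn ['o','p'] L = true
  · have hle : pvScan L 5 ≤ 4 := by
      rcases h4 with h | h | h
      exacts [wit ['m','a','t','i','c'] 4 (by decide) h, wit ['a','r','b'] 4 (by decide) h,
              wit ['o','p'] 4 (by decide) h]
    have hge : ¬ pvScan L 5 ≤ 3 := by
      refine lower 3 ?_ (by omega)
      intro kr hm hr
      simp only [pvKW, List.mem_cons, List.not_mem_nil, or_false] at hm
      rcases hm with rfl|rfl|rfl|rfl|rfl|rfl|rfl|rfl|rfl|rfl|rfl|rfl|rfl
      exacts [Bool.of_not_eq_true h0,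
              Bool.of_not_eq_true h1,
              Bool.of_not_eq_true hsol,
              Bool.of_not_eq_true hada,
              Bool.of_not_eq_true hdot,
              Bool.of_not_eq_true havax,
              Bool.of_not_eq_true hlink,
              Bool.of_not_eq_true huni,
              Bool.of_not_eq_true haave,
              Bool.of_not_eq_true hcomp,
              absurd hr (by decide),
              absurd hr (by decide),
              absurd hr (by decide)]
    have hv : pvScan L 5 = 4 := by omega
    rcases h4 with h | h | h <;>
      simp [h0, h1, hsol, hada, hdot, havax, hlink, huni, haave, hcomp, h, hv, pvSectors]
  obtain ⟨hmatic, harb, hop⟩ :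
      ¬ PySem.Chars.isIn ['m','a','t','i','c'] L = true ∧ ¬ PySem.Chars.isIn ['a','r','b'] L = true ∧
      ¬ PySem.Chars.isIn ['o','p'] L = true := by
    simp only [not_or] at h4; exact h4
  have hge : ¬ pvScan L 5 ≤ 4 := by
    refine lower 4 ?_ (by omega)
    intro kr hm hr
    simp only [pvKW, List.mem_cons, List.not_mem_nil, or_false] at hm
    rcases hm with rfl|rfl|rfl|rfl|rfl|rfl|rfl|rfl|rfl|rfl|rfl|rfl|rfl
    exacts [Bool.of_not_eq_true h0,
            Bool.of_not_eq_true h1,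
            Bool.of_not_eq_true hsol,
            Bool.of_not_eq_true hada,
            Bool.of_not_eq_true hdot,
            Bool.of_not_eq_true havax,
            Bool.of_not_eq_true hlink,
            Bool.of_not_eq_true huni,
            Bool.of_not_eq_true haave,
            Bool.of_not_eq_true hcomp,
            Bool.of_not_eq_true hmatic,
            Bool.of_not_eq_true harb,
            Bool.of_not_eq_true hop]
  have hv : pvScan L 5 = 5 := by omega
  simp [h0, h1, hsol, hada, hdot, havax, hlink, huni, haave, hcomp, hmatic, harb, hop, hv, pvSectors]
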